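-- pv_equiv track=rewrite | github.com/KAMALESH23ITR076/Presorting-Based-Reconciliation-of-Orders-and-Payments-in-Robotic-Warehousing-Systems | DAA.py | find_unmatched_orders_and_payments
-- ===== SOURCE A (Python) =====
-- def find_unmatched_orders_and_payments(orders, payments):
--     orders.sort()
--     payments.sort()
--
--     unpaid_orders = []
--     extra_payments = []
--
--     i = j = 0
--
--     while i < len(orders) and j < len(payments):
--         if orders[i] == payments[j]:
--             i += 1
--             j += 1
--         elif orders[i] < payments[j]:
--             unpaid_orders.append(orders[i])
--             i += 1
--         else:
--             extra_payments.append(payments[j])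
--             j += 1
--
--     while i < len(orders):
--         unpaid_orders.append(orders[i])
--         i += 1
--
--     while j < len(payments):
--         extra_payments.append(payments[j])
--         j += 1
--
--     return unpaid_orders, extra_payments
-- ===== SOURCE B (Python) =====
-- def find_unmatched_orders_and_payments(orders, payments):
--     orders.sort()
--     payments.sort()
--     unpaid_orders = list(orders)
--     for p in payments:
--         if p in unpaid_orders:
--             unpaid_orders.remove(p)
--     extra_payments = list(payments)
--     for o in orders:
--         if o in extra_payments:
--             extra_payments.remove(o)
--     return unpaid_orders, extra_payments
-- ===== Notes on version B (the rewrite author's own statement) =====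
-- stated objective: simpler
-- what changed: Replaces the index-based two-pointer merge scan with a multiset-difference formulation: copy one sorted list and remove one occurrence of each element of the other, in both directions.
import Mathlib
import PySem

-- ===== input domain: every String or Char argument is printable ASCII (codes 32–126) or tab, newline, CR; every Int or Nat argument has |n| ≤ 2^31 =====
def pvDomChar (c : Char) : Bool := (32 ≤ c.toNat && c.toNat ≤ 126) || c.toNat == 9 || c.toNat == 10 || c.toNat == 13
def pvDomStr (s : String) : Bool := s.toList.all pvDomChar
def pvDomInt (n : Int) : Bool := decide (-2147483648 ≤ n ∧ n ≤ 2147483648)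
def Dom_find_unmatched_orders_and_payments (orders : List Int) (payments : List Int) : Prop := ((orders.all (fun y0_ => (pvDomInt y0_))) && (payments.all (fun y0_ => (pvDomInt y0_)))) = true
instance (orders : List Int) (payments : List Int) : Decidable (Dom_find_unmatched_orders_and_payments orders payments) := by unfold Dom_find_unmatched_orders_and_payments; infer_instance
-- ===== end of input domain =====

-- B replaces A's two-pointer merge by a remove-one-occurrence multiset difference in both
-- directions (objective: simpler). Both Pythons sort the argument lists in place identically;
-- the equivalence proved here is about the RETURN value.

-- ===== PORT A =====
-- A's two-pointer merge loop, as structural recursion on the two sorted lists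
def pvMergeDiff : List Int → List Int → List Int × List Int
  | [], ps => ([], ps)
  | x :: xs, [] => (x :: xs, [])
  | x :: xs, y :: ys =>
    if x = y then pvMergeDiff xs ys
    else if x < y then
      let r := pvMergeDiff xs (y :: ys)
      (x :: r.1, r.2)
    else
      let r := pvMergeDiff (x :: xs) ys
      (r.1, y :: r.2)

def find_unmatched_orders_and_payments (orders : List Int) (payments : List Int) : List Int × List Int :=
  let os := PySem.List.sorted orders (fun x => x) false
  let ps := PySem.List.sorted payments (fun x => x) false
  pvMergeDiff os ps

-- ===== PORT B =====
-- one step of B's loop body: `if p in acc: acc.remove(p)`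
def pvRemoveOnce (acc : List Int) (p : Int) : List Int :=
  if p ∈ acc then (PySem.List.remove? acc p).getD acc else acc

def find_unmatched_orders_and_payments_alt (orders : List Int) (payments : List Int) : List Int × List Int :=
  let os := PySem.List.sorted orders (fun x => x) false
  let ps := PySem.List.sorted payments (fun x => x) false
  (ps.foldl pvRemoveOnce os, os.foldl pvRemoveOnce ps)

-- ===== PRECONDITION & SPEC =====
def Spec_find_unmatched_orders_and_payments (orders : List Int) (payments : List Int) (out : List Int × List Int) : Prop := out = find_unmatched_orders_and_payments_alt orders payments
instance (orders : List Int) (payments : List Int) (out : List Int × List Int) : Decidable (Spec_find_unmatched_orders_and_payments orders payments out) := by unfold Spec_find_unmatched_orders_and_payments; infer_instance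

-- ===== CLAIM (what is proved, stated in full; the proofs are below) =====
def Claim_equal_find_unmatched_orders_and_payments : Prop := ∀ (orders : List Int) (payments : List Int), Dom_find_unmatched_orders_and_payments orders payments → Spec_find_unmatched_orders_and_payments orders payments (find_unmatched_orders_and_payments orders payments)

-- ===== LEMMAS AND PROOFS =====

theorem pvRemoveOnce_eq_erase (acc : List Int) (p : Int) : pvRemoveOnce acc p = acc.erase p := by
  unfold pvRemoveOnce
  by_cases h : p ∈ acc
  · simp [h, PySem.List.remove?_eq_some_erase acc p h]
  · simp [h, List.erase_of_not_mem h]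

theorem foldl_removeOnce_eq_foldl_erase (ys xs : List Int) :
    ys.foldl pvRemoveOnce xs = ys.foldl (fun a p => a.erase p) xs := by
  induction ys generalizing xs with
  | nil => rfl
  | cons y ys ih => simp [List.foldl, pvRemoveOnce_eq_erase, ih]

theorem count_foldl_erase (ys xs : List Int) (v : Int) :
    (ys.foldl (fun a p => a.erase p) xs).count v = xs.count v - ys.count v := by
  induction ys generalizing xs with
  | nil => simp
  | cons y ys ih =>
    simp only [List.foldl, ih, List.count_erase, List.count_cons]
    by_cases h : y = v <;> simp [h] <;> omega

theorem foldl_erase_sublist (ys xs : List Int) :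
    (ys.foldl (fun a p => a.erase p) xs).Sublist xs := by
  induction ys generalizing xs with
  | nil => simp
  | cons y ys ih => exact (ih (xs.erase y)).trans List.erase_sublist

theorem not_mem_of_lt_head {x y : Int} {ys : List Int}
    (hs : (y :: ys).Pairwise (· ≤ ·)) (hlt : x < y) : x ∉ y :: ys := by
  intro hmem
  rcases List.mem_cons.mp hmem with h | h
  · omega
  · have := (List.pairwise_cons.mp hs).1 x h
    omega

theorem pvMergeDiff_count : ∀ (os ps : List Int),
    os.Pairwise (· ≤ ·) → ps.Pairwise (· ≤ ·) → ∀ (v : Int),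
    (pvMergeDiff os ps).1.count v = os.count v - ps.count v ∧
    (pvMergeDiff os ps).2.count v = ps.count v - os.count v := by
  intro os ps
  induction os, ps using pvMergeDiff.induct with
  | case1 ps => intro _ _ v; simp [pvMergeDiff]
  | case2 x xs => intro _ _ v; simp [pvMergeDiff]
  | case3 xs y ys ih =>
    intro hos hps v
    obtain ⟨ih1, ih2⟩ := ih (List.pairwise_cons.mp hos).2 (List.pairwise_cons.mp hps).2 v
    simp only [pvMergeDiff, if_pos rfl]
    rcases eq_or_ne y v with h | h <;> simp [List.count_cons, h] <;> omega
  | case4 x xs y ys hne hlt ih =>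
    intro hos hps v
    obtain ⟨ih1, ih2⟩ := ih (List.pairwise_cons.mp hos).2 hps v
    have hx0 : List.count x (y :: ys) = 0 :=
      List.count_eq_zero.mpr (not_mem_of_lt_head hps hlt)
    simp only [pvMergeDiff, if_neg hne, if_pos hlt]
    rcases eq_or_ne x v with h | h <;> rcases eq_or_ne y v with h2 | h2
    · exact absurd (h.trans h2.symm) hne
    all_goals
      simp [List.count_cons, h, h2, Ne.symm hne] at ih1 ih2 hx0 ⊢ <;> omega
  | case5 x xs y ys hne hnlt ih =>
    intro hos hps v
    have hlt : y < x := by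
      rcases lt_trichotomy x y with h | h | h
      · exact absurd h hnlt
      · exact absurd h hne
      · exact h
    obtain ⟨ih1, ih2⟩ := ih hos (List.pairwise_cons.mp hps).2 v
    have hy0 : List.count y (x :: xs) = 0 :=
      List.count_eq_zero.mpr (not_mem_of_lt_head hos hlt)
    simp only [pvMergeDiff, if_neg hne, if_neg hnlt]
    rcases eq_or_ne x v with h | h <;> rcases eq_or_ne y v with h2 | h2
    · exact absurd (h.trans h2.symm) hne
    all_goals
      simp [List.count_cons, h, h2, hne] at ih1 ih2 hy0 ⊢ <;> omega

theorem pvMergeDiff_sublist : ∀ (os ps : List Int),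
    (pvMergeDiff os ps).1.Sublist os ∧ (pvMergeDiff os ps).2.Sublist ps := by
  intro os ps
  induction os, ps using pvMergeDiff.induct with
  | case1 ps => simp [pvMergeDiff]
  | case2 x xs => simp [pvMergeDiff]
  | case3 xs y ys ih =>
    simp only [pvMergeDiff, if_pos rfl]
    exact ⟨ih.1.cons y, ih.2.cons y⟩
  | case4 x xs y ys hne hlt ih =>
    simp only [pvMergeDiff, if_neg hne, if_pos hlt]
    exact ⟨ih.1.cons₂ x, ih.2⟩
  | case5 x xs y ys hne hnlt ih =>
    simp only [pvMergeDiff, if_neg hne, if_neg hnlt]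
    exact ⟨ih.1, ih.2.cons₂ y⟩

-- two ≤-sorted lists with identical counts are equal
theorem eq_of_counts_of_sorted (l₁ l₂ : List Int)
    (hc : ∀ v, l₁.count v = l₂.count v)
    (h₁ : l₁.Pairwise (· ≤ ·)) (h₂ : l₂.Pairwise (· ≤ ·)) : l₁ = l₂ := by
  have hp : l₁.Perm l₂ := List.perm_iff_count.mpr hc
  calc l₁ = PySem.List.sorted l₁ (fun x => x) :=
        (PySem.List.sorted_eq_self_of_pairwise l₁ _ h₁).symm
    _ = PySem.List.sorted l₂ (fun x => x) :=
        (PySem.List.sorted_id_eq_sorted_id_iff_perm l₁ l₂).mpr hp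
    _ = l₂ := PySem.List.sorted_eq_self_of_pairwise l₂ _ h₂

theorem merge_eq_fold (os ps : List Int)
    (hos : os.Pairwise (· ≤ ·)) (hps : ps.Pairwise (· ≤ ·)) :
    pvMergeDiff os ps = (ps.foldl pvRemoveOnce os, os.foldl pvRemoveOnce ps) := by
  have hsub := pvMergeDiff_sublist os ps
  refine Prod.ext ?_ ?_
  · show (pvMergeDiff os ps).1 = ps.foldl pvRemoveOnce os
    rw [foldl_removeOnce_eq_foldl_erase]
    exact eq_of_counts_of_sorted _ _
      (fun v => by rw [(pvMergeDiff_count os ps hos hps v).1, count_foldl_erase])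
      (List.Pairwise.sublist hsub.1 hos)
      (List.Pairwise.sublist (foldl_erase_sublist ps os) hos)
  · show (pvMergeDiff os ps).2 = os.foldl pvRemoveOnce ps
    rw [foldl_removeOnce_eq_foldl_erase]
    exact eq_of_counts_of_sorted _ _
      (fun v => by rw [(pvMergeDiff_count os ps hos hps v).2, count_foldl_erase])
      (List.Pairwise.sublist hsub.2 hps)
      (List.Pairwise.sublist (foldl_erase_sublist os ps) hps)

-- ===== VERDICT (by name: the statement is the Claim_ definition above) =====
theorem find_unmatched_orders_and_payments_spec : Claim_equal_find_unmatched_orders_and_payments := by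
  intro orders payments _
  unfold Spec_find_unmatched_orders_and_payments
  show pvMergeDiff (PySem.List.sorted orders (fun x => x) false)
      (PySem.List.sorted payments (fun x => x) false) = _
  rw [merge_eq_fold _ _ (PySem.List.sorted_pairwise orders (fun x => x))
      (PySem.List.sorted_pairwise payments (fun x => x))]
  rfl
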